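-- pv_equiv track=rewrite | github.com/MnemoSemiotic/prem_prep_june08_2020 | 04_statistical_counting/counting_tools.py | permutations_nP3
-- ===== SOURCE A (Python) =====
-- def permutations_nP3(base=5):
--     base_5_list = []
--
--     for i in range(base):
--         for j in range(base):
--             for k in range(base):
--                 base_5_list.append([i, j, k])
--
--     permutations = []
--
--     for arrangement in base_5_list:
--         is_permutation = True
--
--         for num in arrangement:
--             if arrangement.count(num) > 1:
--                 is_permutation = False
--                 break
--
--         if is_permutation:
--             permutations.append(arrangement)
--
--     return permutations
-- ===== SOURCE B (Python) =====
-- def permutations_nP3(base=5):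
--     r = range(base)
--     return [[i, j, k]
--             for i in r
--             for j in r if j != i
--             for k in r if k != i and k != j]
-- ===== Notes on version B (the rewrite author's own statement) =====
-- stated objective: simpler
-- what changed: Replaces A's build-all-n^3-triples-then-filter-each-with-.count strategy by a single guarded comprehension that skips repeated elements as it generates, never materialising the n^3 intermediate list or calling count.
import Mathlib
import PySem

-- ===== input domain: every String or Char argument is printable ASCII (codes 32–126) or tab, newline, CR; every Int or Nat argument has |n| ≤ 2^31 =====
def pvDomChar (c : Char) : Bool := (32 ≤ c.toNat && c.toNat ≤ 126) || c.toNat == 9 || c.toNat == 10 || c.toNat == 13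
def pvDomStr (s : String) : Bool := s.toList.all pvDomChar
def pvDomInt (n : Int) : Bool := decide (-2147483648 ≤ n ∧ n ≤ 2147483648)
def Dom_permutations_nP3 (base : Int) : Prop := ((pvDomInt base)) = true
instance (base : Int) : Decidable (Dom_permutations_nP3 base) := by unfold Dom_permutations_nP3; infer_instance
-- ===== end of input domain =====

-- B replaces A's build-all-triples-then-filter-with-count strategy by a guarded
-- comprehension that skips repeated elements while generating (objective: simpler).


-- ===== PORT A =====
-- the inner "for num in arrangement: if arrangement.count(num) > 1: …" check
def pvIsPermA (arr : List Int) : Bool := arr.all (fun num => !(PySem.List.count arr num > 1))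

def permutations_nP3 (base : Int) : List (List Int) :=
  let r := PySem.List.pyRange 0 base 1
  let base_5_list :=
    r.foldl (fun acc i =>
      r.foldl (fun acc j =>
        r.foldl (fun acc k => acc ++ [[i, j, k]]) acc) acc) []
  base_5_list.foldl (fun acc arrangement =>
    if pvIsPermA arrangement then acc ++ [arrangement] else acc) []

-- ===== PORT B =====
def permutations_nP3_alt (base : Int) : List (List Int) :=
  let r := PySem.List.pyRange 0 base 1
  r.flatMap (fun i =>
    r.flatMap (fun j =>
      if j = i then [] else
        r.flatMap (fun k =>
          if k = i ∨ k = j then [] else [[i, j, k]])))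

-- ===== PRECONDITION & SPEC =====
def Spec_permutations_nP3 (base : Int) (out : List (List Int)) : Prop := out = permutations_nP3_alt base
instance (base : Int) (out : List (List Int)) : Decidable (Spec_permutations_nP3 base out) := by unfold Spec_permutations_nP3; infer_instance

-- ===== CLAIM (what is proved, stated in full; the proofs are below) =====
def Claim_equal_permutations_nP3 : Prop := ∀ (base : Int), Dom_permutations_nP3 base → Spec_permutations_nP3 base (permutations_nP3 base)

-- ===== LEMMAS AND PROOFS =====

-- A's distinctness test on a literal triple is exactly pairwise inequality
lemma pvIsPermA_triple (i j k : Int) :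
    pvIsPermA [i, j, k] = (decide ¬(j = i) && decide ¬(k = i ∨ k = j)) := by
  by_cases hji : j = i <;> by_cases hki : k = i <;> by_cases hkj : k = j <;>
    simp [pvIsPermA, PySem.List.count, hji, hki, hkj, List.count_cons]
  · omega
  · simp [Ne.symm hji, Ne.symm hki, Ne.symm hkj]

-- filtering A's inner map by pvIsPermA equals B's guarded generation for fixed i, j
lemma pvInner (r : List Int) (i j : Int) :
    ((r.map (fun k => [i, j, k])).filter pvIsPermA)
      = (if j = i then [] else
          r.flatMap (fun k => if k = i ∨ k = j then [] else [[i, j, k]])) := by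
  induction r with
  | nil => by_cases hji : j = i <;> simp [hji]
  | cons k r ih =>
      by_cases hji : j = i <;>
        by_cases hk : k = i ∨ k = j <;>
          simp [hji, hk, pvIsPermA_triple, ih]

theorem permutations_nP3_spec : Claim_equal_permutations_nP3 := by
  intro base _
  unfold Spec_permutations_nP3 permutations_nP3 permutations_nP3_alt
  simp only [PySem.List.foldl_append_singleton_eq_map, List.nil_append,
    PySem.List.foldl_append_eq_flatMap, PySem.List.foldl_append_if,
    List.map_id', List.filter_flatMap]
  refine List.flatMap_congr (fun i _ => List.flatMap_congr (fun j _ => ?_))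
  exact pvInner (PySem.List.pyRange 0 base 1) i j
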